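-- pv_equiv track=rewrite | github.com/datalad/datalad | datalad/support/sshconnector.py | _quote_filename_for_scp
-- ===== SOURCE A (Python) =====
-- def _quote_filename_for_scp(name):
--     """Manually escape shell goodies in a file name.
--
--     Why manual? Because the author couldn't find a better way, and
--     simply quoting the entire filename does not work with SCP's overly
--     strict file matching criteria (likely a bug on their side).
--
--     Hence this beauty:
--     """
--     for s, t in (
--             (' ', '\\ '),
--             ('"', '\\"'),
--             ("'", "\\'"),
--             ("&", "\\&"),
--             ("|", "\\|"),
--             (">", "\\>"),
--             ("<", "\\<"),
--             (";", "\\;")):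
--         name = name.replace(s, t)
--     return name
-- ===== SOURCE B (Python) =====
-- _SPECIAL = frozenset(' "\'&|><;')
--
--
-- def _quote_filename_for_scp(name):
--     # one character-level pass instead of eight full-string replace passes
--     return ''.join('\\' + c if c in _SPECIAL else c for c in name)
-- ===== Notes on version B (the rewrite author's own statement) =====
-- stated objective: idiomatic
-- what changed: Replaces eight sequential full-string str.replace passes with a single character-level scan that emits '\'+c for the eight shell-special characters and c otherwise, joined once.
import Mathlib
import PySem

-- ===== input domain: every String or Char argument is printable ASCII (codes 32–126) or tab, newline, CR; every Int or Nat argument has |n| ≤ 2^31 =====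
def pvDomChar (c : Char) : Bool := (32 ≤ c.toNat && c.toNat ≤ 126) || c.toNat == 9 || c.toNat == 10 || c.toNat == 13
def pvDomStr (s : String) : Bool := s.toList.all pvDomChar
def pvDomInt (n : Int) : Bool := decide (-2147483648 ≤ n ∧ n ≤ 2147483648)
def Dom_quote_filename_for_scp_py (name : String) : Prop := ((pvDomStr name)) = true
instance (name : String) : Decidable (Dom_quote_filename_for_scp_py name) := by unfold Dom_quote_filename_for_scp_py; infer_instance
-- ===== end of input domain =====

-- B replaces A's eight sequential full-string replace passes with one character-level
-- scan emitting '\' + c for the eight shell-special characters (objective: idiomatic).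

-- ===== PORT A =====
def quote_filename_for_scp_py (name : String) : String :=
  let name := PySem.Str.replace name " " "\\ "
  let name := PySem.Str.replace name "\"" "\\\""
  let name := PySem.Str.replace name "'" "\\'"
  let name := PySem.Str.replace name "&" "\\&"
  let name := PySem.Str.replace name "|" "\\|"
  let name := PySem.Str.replace name ">" "\\>"
  let name := PySem.Str.replace name "<" "\\<"
  let name := PySem.Str.replace name ";" "\\;"
  name

-- ===== PORT B =====
-- the set of shell-special characters, defined once (Source B's _SPECIAL)
def scpSpecialChars : List Char := [' ', '"', '\'', '&', '|', '>', '<', ';']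

-- ''.join('\\' + c if c in _SPECIAL else c for c in name)
def quote_filename_for_scp_py_alt (name : String) : String :=
  String.ofList (name.toList.flatMap (fun c => if c ∈ scpSpecialChars then ['\\', c] else [c]))

-- ===== PRECONDITION & SPEC =====
def Spec_quote_filename_for_scp_py (name : String) (out : String) : Prop := out = quote_filename_for_scp_py_alt name
instance (name : String) (out : String) : Decidable (Spec_quote_filename_for_scp_py name out) := by unfold Spec_quote_filename_for_scp_py; infer_instance

-- ===== CLAIM (what is proved, stated in full; the proofs are below) =====
def Claim_equal_quote_filename_for_scp_py : Prop := ∀ (name : String), Dom_quote_filename_for_scp_py name → Spec_quote_filename_for_scp_py name (quote_filename_for_scp_py name)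

-- ===== LEMMAS AND PROOFS =====

-- replace with a single-char pattern is a flatMap over the characters
theorem replace_go_single (a : Char) (n : List Char) :
    ∀ (l acc : List Char),
      PySem.Chars.replace.go [a] n l.length l acc
        = acc.reverse ++ l.flatMap (fun c => if c = a then n else [c]) := by
  intro l
  induction l with
  | nil => intro acc; simp [PySem.Chars.replace.go]
  | cons c t ih =>
    intro acc
    show PySem.Chars.replace.go [a] n (t.length + 1) (c :: t) acc = _
    rw [PySem.Chars.replace.go]
    by_cases h : c = a
    · subst h
      simp [List.isPrefixOf, ih]
    · have : [a].isPrefixOf (c :: t) = false := by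
        simp [List.isPrefixOf]; exact fun hh => (h hh.symm).elim
      simp [this, ih, h]

theorem replace_single (s : List Char) (a : Char) (n : List Char) :
    PySem.Chars.replace s [a] n = s.flatMap (fun c => if c = a then n else [c]) := by
  rw [PySem.Chars.replace]
  simp [replace_go_single]

theorem quote_toList (name : String) :
    (quote_filename_for_scp_py name).toList
      = name.toList.flatMap (fun c => if c ∈ scpSpecialChars then ['\\', c] else [c]) := by
  have e1 : (" " : String).toList = [' '] := by decide
  have e2 : ("\\ " : String).toList = ['\\', ' '] := by decide
  have e3 : ("\"" : String).toList = ['"'] := by decide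
  have e4 : ("\\\"" : String).toList = ['\\', '"'] := by decide
  have e5 : ("'" : String).toList = ['\''] := by decide
  have e6 : ("\\'" : String).toList = ['\\', '\''] := by decide
  have e7 : ("&" : String).toList = ['&'] := by decide
  have e8 : ("\\&" : String).toList = ['\\', '&'] := by decide
  have e9 : ("|" : String).toList = ['|'] := by decide
  have e10 : ("\\|" : String).toList = ['\\', '|'] := by decide
  have e11 : (">" : String).toList = ['>'] := by decide
  have e12 : ("\\>" : String).toList = ['\\', '>'] := by decide
  have e13 : ("<" : String).toList = ['<'] := by decide
  have e14 : ("\\<" : String).toList = ['\\', '<'] := by decide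
  have e15 : (";" : String).toList = [';'] := by decide
  have e16 : ("\\;" : String).toList = ['\\', ';'] := by decide
  simp only [quote_filename_for_scp_py, PySem.Str.toList_replace, e1, e2, e3, e4, e5, e6,
    e7, e8, e9, e10, e11, e12, e13, e14, e15, e16, replace_single, List.flatMap_assoc]
  apply List.flatMap_congr
  intro c _
  by_cases h1 : c = ' '; · subst h1; decide
  by_cases h2 : c = '"'; · subst h2; decide
  by_cases h3 : c = '\''; · subst h3; decide
  by_cases h4 : c = '&'; · subst h4; decide
  by_cases h5 : c = '|'; · subst h5; decide
  by_cases h6 : c = '>'; · subst h6; decide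
  by_cases h7 : c = '<'; · subst h7; decide
  by_cases h8 : c = ';'; · subst h8; decide
  have hmem : c ∉ scpSpecialChars := by
    simp [scpSpecialChars]
    exact ⟨h1, h2, h3, h4, h5, h6, h7, h8⟩
  simp [h1, h2, h3, h4, h5, h6, h7, h8, hmem]

-- ===== VERDICT (by name: the statement is the Claim_ definition above) =====
theorem quote_filename_for_scp_py_spec : Claim_equal_quote_filename_for_scp_py := by
  intro name _
  unfold Spec_quote_filename_for_scp_py quote_filename_for_scp_py_alt
  rw [← quote_toList, String.ofList_toList]
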